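-- pv_equiv track=rewrite | github.com/lemphis/algorithm | 백준/Silver/1411. 비슷한 단어/비슷한 단어.py | convert
-- ===== SOURCE A (Python) =====
-- def convert(word):
--     m = {}
--     idx = 0
--     new_word = []
--     for c in word:
--         if c not in m:
--             m[c] = idx
--             idx += 1
--         new_word.append(str(m[c]))
--
--     return "".join(new_word)
-- ===== SOURCE B (Python) =====
-- def convert(word):
--     # Each character's code is the number of distinct characters occurring
--     # strictly before its first occurrence; recomputed per character, no table.
--     return "".join(str(len(set(word[:word.index(c)]))) for c in word)
-- ===== Notes on version B (the rewrite author's own statement) =====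
-- stated objective: simpler
-- what changed: B drops A's incrementally-grown dict/counter entirely: for each character it recomputes its code directly as the number of distinct characters in the prefix before that character's first occurrence (set + index per character, quadratic), a one-line closed-form rule instead of A's stateful single pass.
import Mathlib
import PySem

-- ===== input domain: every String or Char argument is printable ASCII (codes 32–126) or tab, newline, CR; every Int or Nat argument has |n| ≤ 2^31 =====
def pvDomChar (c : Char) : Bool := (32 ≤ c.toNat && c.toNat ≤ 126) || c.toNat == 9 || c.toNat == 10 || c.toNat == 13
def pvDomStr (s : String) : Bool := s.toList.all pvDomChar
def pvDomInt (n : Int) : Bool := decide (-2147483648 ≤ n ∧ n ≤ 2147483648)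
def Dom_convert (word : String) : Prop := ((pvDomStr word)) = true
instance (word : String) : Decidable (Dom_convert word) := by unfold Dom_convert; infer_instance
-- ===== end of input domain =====

-- B replaces A's stateful dict-growing pass by a per-character closed-form rule
-- (code = number of distinct characters before the first occurrence); alternative
-- stateless decomposition, simpler to read, quadratic instead of linear.

-- ===== PORT A =====
-- A's single fused loop: grow the dict m (next code for unseen chars) and emit str(m[c]) per char.
def convertLoopA : List Char → PySem.Dict Char Int → Int → List String → List String
  | [], _, _, acc => acc
  | c :: rest, m, idx, acc =>
    if m.contains c then
      convertLoopA rest m idx (acc ++ [PySem.Int.toStr (m.getD c 0)])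
    else
      convertLoopA rest (m.insert c idx) (idx + 1)
        (acc ++ [PySem.Int.toStr ((m.insert c idx).getD c 0)])

def convert (word : String) : String :=
  PySem.Str.join "" (convertLoopA word.toList PySem.Dict.empty 0 [])

-- ===== PORT B =====
-- "".join(str(len(set(word[:word.index(c)]))) for c in word)
-- word.index(c) → List.idxOf (exact: each c is a member of word, so .index returns
-- the first-occurrence index and never raises); word[:j] with j ≥ 0 → List.take j;
-- set(...) → PySem.Set.ofList; len → .length (cast to Int for str()).
def convert_alt (word : String) : String :=
  PySem.Str.join "" (word.toList.map (fun c =>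
    PySem.Int.toStr ((PySem.Set.ofList (word.toList.take (word.toList.idxOf c))).length : Int)))

-- ===== PRECONDITION & SPEC =====
def Spec_convert (word : String) (out : String) : Prop := out = convert_alt word
instance (word : String) (out : String) : Decidable (Spec_convert word out) := by unfold Spec_convert; infer_instance

-- ===== CLAIM (what is proved, stated in full; the proofs are below) =====
def Claim_equal_convert : Prop := ∀ (word : String), Dom_convert word → Spec_convert word (convert word)

-- ===== LEMMAS AND PROOFS =====

theorem idxOf_append_of_mem' {α : Type} [DecidableEq α] (l t : List α) (c : α) (h : c ∈ l) :
    (l ++ t).idxOf c = l.idxOf c := by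
  induction l with
  | nil => simp at h
  | cons x l ih =>
    by_cases hx : x = c
    · simp [hx]
    · cases List.mem_cons.mp h with
      | inl he => exact absurd he.symm hx
      | inr hm => simp [hx, ih hm]

theorem idxOf_append_self' {α : Type} [DecidableEq α] (l : List α) (c : α) (h : c ∉ l) :
    (l ++ [c]).idxOf c = l.length := by
  induction l with
  | nil => simp
  | cons x l ih =>
    have hx : x ≠ c := by rintro rfl; exact h (List.mem_cons_self)
    simp [hx, ih (fun hm => h (List.mem_cons_of_mem _ hm))]

theorem foldl_add_prefix {α : Type} [DecidableEq α] (b : List α) (s : PySem.Set α) :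
    ∃ t, b.foldl PySem.Set.add s = s ++ t := by
  induction b generalizing s with
  | nil => exact ⟨[], by simp⟩
  | cons x b ih =>
    by_cases hx : x ∈ s
    · obtain ⟨t, ht⟩ := ih (PySem.Set.add s x)
      exact ⟨t, by simpa [PySem.Set.add, hx] using ht⟩
    · obtain ⟨t, ht⟩ := ih (PySem.Set.add s x)
      refine ⟨[x] ++ t, ?_⟩
      rw [List.foldl_cons, ht]
      simp [PySem.Set.add, hx]

theorem dedup_append_prefix {α : Type} [DecidableEq α] (a b : List α) :
    ∃ t, PySem.List.dedup (a ++ b) = PySem.List.dedup a ++ t := by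
  have h : PySem.List.dedup (a ++ b) = b.foldl PySem.Set.add (PySem.List.dedup a) := by
    simp only [PySem.List.dedup_eq_ofList, PySem.Set.ofList_eq_foldl, List.foldl_append]
  rw [h]; exact foldl_add_prefix b _

theorem add_of_mem' {α : Type} [DecidableEq α] (s : PySem.Set α) (x : α) (h : x ∈ s) :
    PySem.Set.add s x = s := by simp [PySem.Set.add, h]

theorem add_of_not_mem' {α : Type} [DecidableEq α] (s : PySem.Set α) (x : α) (h : x ∉ s) :
    PySem.Set.add s x = s ++ [x] := by simp [PySem.Set.add, h]

theorem dedup_append_add {α : Type} [DecidableEq α] (a : List α) (c : α) :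
    PySem.List.dedup (a ++ [c]) = PySem.Set.add (PySem.List.dedup a) c := by
  simp only [PySem.List.dedup_eq_ofList, PySem.Set.ofList_eq_foldl, List.foldl_append,
    List.foldl_cons, List.foldl_nil]

theorem dedup_append_singleton_of_not_mem {α : Type} [DecidableEq α] (a : List α) (c : α)
    (h : c ∉ a) : PySem.List.dedup (a ++ [c]) = PySem.List.dedup a ++ [c] := by
  have h' : c ∉ PySem.List.dedup a := by simpa [PySem.List.mem_dedup] using h
  rw [dedup_append_add, add_of_not_mem' _ _ h']

theorem dedup_append_singleton_of_mem {α : Type} [DecidableEq α] (a : List α) (c : α)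
    (h : c ∈ a) : PySem.List.dedup (a ++ [c]) = PySem.List.dedup a := by
  have h' : c ∈ PySem.List.dedup a := by simpa [PySem.List.mem_dedup] using h
  rw [dedup_append_add, add_of_mem' _ _ h']

-- A's loop characterised against the final first-occurrence-index codes
theorem convertLoopA_spec (cs : List Char) : ∀ (seen : List Char) (m : PySem.Dict Char Int)
    (acc : List String),
    (∀ c, m.get? c = if c ∈ seen then some (((PySem.List.dedup seen).idxOf c : Int)) else none) →
    convertLoopA cs m ((PySem.List.dedup seen).length : Int) acc
      = acc ++ cs.map (fun c => PySem.Int.toStr (((PySem.List.dedup (seen ++ cs)).idxOf c : Int))) := by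
  induction cs with
  | nil => intro seen m acc hm; simp [convertLoopA]
  | cons c rest ih =>
    intro seen m acc hm
    have hassoc : seen ++ c :: rest = (seen ++ [c]) ++ rest := by simp
    by_cases hcs : c ∈ seen
    · have hcon : m.contains c = true := by
        rw [PySem.Dict.contains_eq_isSome_get?, hm c, if_pos hcs]; rfl
      have hval : m.getD c 0 = ((PySem.List.dedup seen).idxOf c : Int) := by
        rw [PySem.Dict.getD_eq_get?_getD, hm c, if_pos hcs]; rfl
      have hded : PySem.List.dedup (seen ++ [c]) = PySem.List.dedup seen :=
        dedup_append_singleton_of_mem seen c hcs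
      have hm' : ∀ c', m.get? c' =
          if c' ∈ seen ++ [c] then some (((PySem.List.dedup (seen ++ [c])).idxOf c' : Int)) else none := by
        intro c'
        rw [hded, hm c']
        by_cases h' : c' ∈ seen
        · rw [if_pos h', if_pos (List.mem_append_left _ h')]
        · rw [if_neg h', if_neg (by
            intro hmem
            rcases List.mem_append.mp hmem with h | h
            · exact h' h
            · rw [List.mem_singleton] at h; subst h; exact h' hcs)]
      have hstep := ih (seen ++ [c]) m
        (acc ++ [PySem.Int.toStr (m.getD c 0)]) hm'
      rw [hded] at hstep
      rw [convertLoopA, if_pos hcon, hstep, hval]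
      obtain ⟨t, ht⟩ := dedup_append_prefix seen (c :: rest)
      rw [← hassoc, List.map_cons, ht,
        idxOf_append_of_mem' _ t c (by rw [PySem.List.mem_dedup]; exact hcs)]
      simp
    · have hcon : m.contains c = false := by
        rw [PySem.Dict.contains_eq_isSome_get?, hm c, if_neg hcs]; rfl
      have hcd : c ∉ PySem.List.dedup seen := by rw [PySem.List.mem_dedup]; exact hcs
      have hded : PySem.List.dedup (seen ++ [c]) = PySem.List.dedup seen ++ [c] :=
        dedup_append_singleton_of_not_mem seen c hcs
      set n : Int := ((PySem.List.dedup seen).length : Int) with hn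
      have hval : (m.insert c n).getD c 0 = n := PySem.Dict.getD_insert_self m c n 0
      have hm' : ∀ c', (m.insert c n).get? c' =
          if c' ∈ seen ++ [c] then some (((PySem.List.dedup (seen ++ [c])).idxOf c' : Int)) else none := by
        intro c'
        rw [PySem.Dict.get?_insert, hded]
        by_cases h' : c' = c
        · subst h'
          rw [if_pos rfl, if_pos (List.mem_append_right _ (List.mem_singleton.mpr rfl)),
            idxOf_append_self' _ _ hcd]
        · rw [if_neg h', hm c']
          by_cases h'' : c' ∈ seen
          · rw [if_pos h'', if_pos (List.mem_append_left _ h''),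
              idxOf_append_of_mem' _ _ _ (by rw [PySem.List.mem_dedup]; exact h'')]
          · rw [if_neg h'', if_neg (by
              intro hmem
              rcases List.mem_append.mp hmem with h | h
              · exact h'' h
              · exact h' (List.mem_singleton.mp h))]
      have hlen : n + 1 = ((PySem.List.dedup (seen ++ [c])).length : Int) := by
        rw [hded, List.length_append, List.length_singleton]; push_cast; omega
      have hstep := ih (seen ++ [c]) (m.insert c n)
        (acc ++ [PySem.Int.toStr ((m.insert c n).getD c 0)]) hm'
      rw [← hlen] at hstep
      rw [convertLoopA, if_neg (by simp [hcon]), hstep, hval]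
      have hhead : List.idxOf c (PySem.List.dedup (seen ++ c :: rest))
          = (PySem.List.dedup seen).length := by
        obtain ⟨t, ht⟩ := dedup_append_prefix (seen ++ [c]) rest
        rw [hassoc, ht, hded,
          idxOf_append_of_mem' _ t c (List.mem_append_right _ (List.mem_singleton.mpr rfl)),
          idxOf_append_self' _ _ hcd]
      have hts : PySem.Int.toStr n
          = PySem.Int.toStr ((List.idxOf c (PySem.List.dedup (seen ++ c :: rest)) : Int)) := by
        rw [hhead, hn]
      rw [← hassoc, List.map_cons, hts]
      simp

-- a first occurrence is not in the prefix before it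
theorem not_mem_take_idxOf' {α : Type} [DecidableEq α] (l : List α) (c : α) :
    c ∉ l.take (l.idxOf c) := by
  induction l with
  | nil => simp
  | cons x l ih =>
    by_cases hx : x = c
    · simp [hx]
    · intro hmem
      have hxc : (x == c) = false := by simpa using hx
      rw [List.idxOf_cons, hxc, cond_false, List.take_succ_cons] at hmem
      rcases List.mem_cons.mp hmem with h | h
      · exact hx h.symm
      · exact ih h

-- the first-occurrence index in the dedup list = number of distinct chars before the first occurrence
theorem dedup_idxOf_eq_take (ws : List Char) (c : Char) (h : c ∈ ws) :
    (PySem.List.dedup ws).idxOf c = (PySem.List.dedup (ws.take (ws.idxOf c))).length := by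
  have hlt : ws.idxOf c < ws.length := List.idxOf_lt_length_of_mem h
  have hget : ws[ws.idxOf c] = c := List.getElem_idxOf hlt
  have hsplit : ws = ws.take (ws.idxOf c) ++ c :: ws.drop (ws.idxOf c + 1) := by
    conv_lhs => rw [← List.take_append_drop (ws.idxOf c) ws]
    rw [List.drop_eq_getElem_cons hlt, hget]
  have hnm : c ∉ ws.take (ws.idxOf c) := not_mem_take_idxOf' ws c
  have hnd : c ∉ PySem.List.dedup (ws.take (ws.idxOf c)) := by
    rw [PySem.List.mem_dedup]; exact hnm
  obtain ⟨t, ht⟩ := dedup_append_prefix (ws.take (ws.idxOf c) ++ [c]) (ws.drop (ws.idxOf c + 1))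
  conv_lhs => rw [hsplit]
  rw [show ws.take (ws.idxOf c) ++ c :: ws.drop (ws.idxOf c + 1)
        = (ws.take (ws.idxOf c) ++ [c]) ++ ws.drop (ws.idxOf c + 1) by simp,
      ht, dedup_append_singleton_of_not_mem _ _ hnm,
      idxOf_append_of_mem' _ t c (List.mem_append_right _ (List.mem_singleton.mpr rfl)),
      idxOf_append_self' _ _ hnd]

theorem convert_eq (word : String) : convert word = convert_alt word := by
  unfold convert convert_alt
  have hA := convertLoopA_spec word.toList [] PySem.Dict.empty []
    (by intro c; simp [PySem.Dict.get?_empty])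
  simp only [PySem.List.dedup_eq_ofList] at hA ⊢
  norm_num at hA
  rw [hA]
  congr 1
  apply List.map_congr_left
  intro c hc
  rw [← PySem.List.dedup_eq_ofList, ← PySem.List.dedup_eq_ofList,
    dedup_idxOf_eq_take word.toList c hc]

-- ===== VERDICT (by name: the statement is the Claim_ definition above) =====
theorem convert_spec : Claim_equal_convert := by
  intro word _
  exact convert_eq word
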